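-- pv_equiv track=rewrite | github.com/Yopla38/OntoFlow | agent/Onto_wa_rag/context_provider/semantic_context_provider.py | _find_common_code_patterns
-- ===== SOURCE A (Python) =====
-- from typing import Dict, List, Any, Optional, Set
--
-- def _find_common_code_patterns(code1: str, code2: str) -> List[str]:
--     """Trouve les patterns de code communs entre deux chunks"""
--     patterns = []
--
--     # Patterns algorithmiques simples
--     pattern_keywords = {
--         "loops": ["do ", "while", "for"],
--         "conditionals": ["if ", "select case", "where"],
--         "math_operations": ["sqrt", "sin", "cos", "exp", "log"],
--         "array_operations": ["sum(", "product(", "maxval", "minval"],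
--         "io_operations": ["read", "write", "print", "open", "close"]
--     }
--
--     code1_lower = code1.lower()
--     code2_lower = code2.lower()
--
--     for pattern_name, keywords in pattern_keywords.items():
--         if (any(kw in code1_lower for kw in keywords) and
--                 any(kw in code2_lower for kw in keywords)):
--             patterns.append(pattern_name)
--
--     return patterns
-- ===== SOURCE B (Python) =====
-- # B: a hand-rolled multi-pattern text scanner: slide over every position of the
-- # lowercased code once, testing which keywords start there, accumulating per-category
-- # flags; then keep the categories flagged in both strings, in table order.
--
-- _KW = [(0, "do "), (0, "while"), (0, "for"),
--        (1, "if "), (1, "select case"), (1, "where"),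
--        (2, "sqrt"), (2, "sin"), (2, "cos"), (2, "exp"), (2, "log"),
--        (3, "sum("), (3, "product("), (3, "maxval"), (3, "minval"),
--        (4, "read"), (4, "write"), (4, "print"), (4, "open"), (4, "close")]
--
-- _NAMES = ["loops", "conditionals", "math_operations",
--           "array_operations", "io_operations"]
--
--
-- def _scan(code):
--     low = code.lower()
--     flags = [False] * 5
--     for i in range(len(low)):
--         for k, kw in _KW:
--             if low.startswith(kw, i):
--                 flags[k] = True
--     return flags
--
--
-- def _find_common_code_patterns(code1, code2):
--     f1 = _scan(code1)
--     f2 = _scan(code2)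
--     return [name for k, name in enumerate(_NAMES) if f1[k] and f2[k]]
-- ===== Notes on version B (the rewrite author's own statement) =====
-- stated objective: alternative
-- what changed: A asks, per category, whether some keyword is a substring of each code via joint `kw in code` tests; B instead runs a hand-rolled multi-pattern scanner over each lowered string once - at every text position it tests which keywords start there and sets per-category boolean flags - then intersects the two flag vectors in table order (text-position-driven matching vs keyword-driven membership tests).
import Mathlib
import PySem

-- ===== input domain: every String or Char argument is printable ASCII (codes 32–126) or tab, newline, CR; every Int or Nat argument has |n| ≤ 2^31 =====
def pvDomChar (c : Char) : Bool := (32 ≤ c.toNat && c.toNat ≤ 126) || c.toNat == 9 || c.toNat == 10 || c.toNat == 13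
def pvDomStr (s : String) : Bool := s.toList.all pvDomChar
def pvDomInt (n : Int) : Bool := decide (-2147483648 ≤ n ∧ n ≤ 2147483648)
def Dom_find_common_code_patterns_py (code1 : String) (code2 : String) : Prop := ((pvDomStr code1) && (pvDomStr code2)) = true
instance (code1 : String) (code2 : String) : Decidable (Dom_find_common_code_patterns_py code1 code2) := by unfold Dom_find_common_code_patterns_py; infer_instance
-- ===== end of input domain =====

-- B replaces A's keyword-driven `kw in code` membership tests by a hand-rolled multi-pattern
-- text scanner: one pass over every position of each lowered string, setting per-category
-- flags, then the ordered intersection of the two flag vectors (alternative, same cost).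

-- ===== PORT A =====
def pvTableA : List (String × List String) :=
  [("loops", ["do ", "while", "for"]),
   ("conditionals", ["if ", "select case", "where"]),
   ("math_operations", ["sqrt", "sin", "cos", "exp", "log"]),
   ("array_operations", ["sum(", "product(", "maxval", "minval"]),
   ("io_operations", ["read", "write", "print", "open", "close"])]

def find_common_code_patterns_py (code1 : String) (code2 : String) : List String :=
  let code1_lower := PySem.Str.lower code1
  let code2_lower := PySem.Str.lower code2
  pvTableA.foldl
    (fun patterns p =>
      if (p.2.any (fun kw => PySem.Str.isIn kw code1_lower)) &&
         (p.2.any (fun kw => PySem.Str.isIn kw code2_lower)) then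
        patterns ++ [p.1]
      else patterns) []

-- ===== PORT B =====
def pvKW : List (Nat × List Char) :=
  [(0, ['d','o',' ']), (0, ['w','h','i','l','e']), (0, ['f','o','r']),
   (1, ['i','f',' ']), (1, ['s','e','l','e','c','t',' ','c','a','s','e']), (1, ['w','h','e','r','e']),
   (2, ['s','q','r','t']), (2, ['s','i','n']), (2, ['c','o','s']), (2, ['e','x','p']), (2, ['l','o','g']),
   (3, ['s','u','m','(']), (3, ['p','r','o','d','u','c','t','(']), (3, ['m','a','x','v','a','l']), (3, ['m','i','n','v','a','l']),
   (4, ['r','e','a','d']), (4, ['w','r','i','t','e']), (4, ['p','r','i','n','t']), (4, ['o','p','e','n']), (4, ['c','l','o','s','e'])]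

def pvNames : List String :=
  ["loops", "conditionals", "math_operations", "array_operations", "io_operations"]

-- low.startswith(kw, i): exact for 0 ≤ i (here i ranges over 0..len-1) = kw prefix of low[i:]
def pvScan (code : String) : List Bool :=
  let low := PySem.Chars.lower code.toList
  (List.range low.length).foldl
    (fun flags i =>
      pvKW.foldl
        (fun fl p => if p.2.isPrefixOf (low.drop i) then fl.set p.1 true else fl)
        flags)
    [false, false, false, false, false]

def find_common_code_patterns_py_alt (code1 : String) (code2 : String) : List String :=
  let f1 := pvScan code1
  let f2 := pvScan code2
  (PySem.List.enumerate pvNames).filterMap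
    (fun p => if PySem.List.pyGetD f1 p.1 false && PySem.List.pyGetD f2 p.1 false then some p.2 else none)

-- ===== PRECONDITION & SPEC =====
def Spec_find_common_code_patterns_py (code1 : String) (code2 : String) (out : List String) : Prop := out = find_common_code_patterns_py_alt code1 code2
instance (code1 : String) (code2 : String) (out : List String) : Decidable (Spec_find_common_code_patterns_py code1 code2 out) := by unfold Spec_find_common_code_patterns_py; infer_instance

-- ===== CLAIM =====
def Claim_equal_find_common_code_patterns_py : Prop := ∀ (code1 : String) (code2 : String), Dom_find_common_code_patterns_py code1 code2 → Spec_find_common_code_patterns_py code1 code2 (find_common_code_patterns_py code1 code2)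

-- ===== LEMMAS AND PROOFS =====

theorem pv_len_inner (pairs : List (Nat × List Char)) (cond : Nat × List Char → Bool) (fl : List Bool) :
    (pairs.foldl (fun fl p => if cond p then fl.set p.1 true else fl) fl).length = fl.length := by
  induction pairs generalizing fl with
  | nil => rfl
  | cons p rest ih => simp only [List.foldl_cons]; split <;> simp [ih]

theorem pv_getD_set (fl : List Bool) (j k : Nat) :
    (fl.set j true).getD k false = ((j == k && decide (k < fl.length)) || fl.getD k false) := by
  simp only [List.getD, List.getElem?_set]
  by_cases hj : j = k
  · subst hj
    by_cases hk : j < fl.length <;> simp [hk]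
  · simp [hj]

theorem pv_inner_fold (pairs : List (Nat × List Char)) (cond : Nat × List Char → Bool)
    (fl : List Bool) (k : Nat) :
    (pairs.foldl (fun fl p => if cond p then fl.set p.1 true else fl) fl).getD k false
    = (fl.getD k false || pairs.any (fun p => p.1 == k && decide (k < fl.length) && cond p)) := by
  induction pairs generalizing fl with
  | nil => simp
  | cons p rest ih =>
    simp only [List.foldl_cons, List.any_cons]
    by_cases h : cond p
    · rw [if_pos h, ih, List.length_set, pv_getD_set, h]
      cases hp : (p.1 == k) <;> cases hk : decide (k < fl.length) <;> simp_all
    · rw [if_neg h, ih]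
      have : cond p = false := by simpa using h
      simp [this]

theorem pv_outer_fold (L : List Nat) (cond : Nat × List Char → Nat → Bool)
    (fl : List Bool) (k : Nat) :
    (L.foldl (fun flags i =>
        pvKW.foldl (fun fl p => if cond p i then fl.set p.1 true else fl) flags) fl).getD k false
    = (fl.getD k false || L.any (fun i => pvKW.any (fun p => p.1 == k && decide (k < fl.length) && cond p i))) := by
  induction L generalizing fl with
  | nil => simp
  | cons i rest ih =>
    simp only [List.foldl_cons, List.any_cons]
    rw [ih, pv_inner_fold, pv_len_inner]
    cases h : (fl.getD k false) <;> simp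

theorem pv_any_congr {α : Type} (l : List α) (f g : α → Bool)
    (h : ∀ x ∈ l, f x = g x) : l.any f = l.any g := by
  induction l with
  | nil => rfl
  | cons x xs ih =>
    simp only [List.any_cons, h x (by simp)]
    rw [ih (fun y hy => h y (by simp [hy]))]

-- for nonempty kw : occurring at some scanned position = being a substring
theorem pv_occ_eq_isIn (kw low : List Char) (hkw : kw ≠ []) :
    (List.range low.length).any (fun i => kw.isPrefixOf (low.drop i)) = PySem.Chars.isIn kw low := by
  by_cases h : PySem.Chars.isIn kw low = true
  · rw [h]
    obtain ⟨j, hj⟩ := (PySem.Chars.exists_prefix_drop_iff_isIn kw low).2 h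
    have hjlt : j < low.length := by
      by_contra hge
      rw [List.drop_eq_nil_of_le (le_of_not_gt hge)] at hj
      exact hkw (List.prefix_nil.1 hj)
    simp only [List.any_eq_true, List.mem_range]
    exact ⟨j, hjlt, by simpa [List.isPrefixOf_iff_prefix] using hj⟩
  · have h' : PySem.Chars.isIn kw low = false := by simpa using h
    rw [h']
    simp only [List.any_eq_false, List.mem_range]
    intro i _
    rw [Bool.not_eq_true, ← Bool.not_eq_true, List.isPrefixOf_iff_prefix]
    intro hp
    exact h ((PySem.Chars.exists_prefix_drop_iff_isIn kw low).1 ⟨i, hp⟩)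

theorem pv_scan_getD (code : String) (k : Nat) (hk : k < 5) :
    (pvScan code).getD k false
    = pvKW.any (fun p => p.1 == k && PySem.Chars.isIn p.2 (PySem.Chars.lower code.toList)) := by
  unfold pvScan
  rw [pv_outer_fold]
  have hfl : ([false, false, false, false, false] : List Bool).getD k false = false := by
    interval_cases k <;> rfl
  rw [hfl, Bool.false_or]
  have swap : ∀ (L : List Nat) (f : Nat × List Char → Nat → Bool),
      L.any (fun i => pvKW.any (fun p => f p i)) = pvKW.any (fun p => L.any (fun i => f p i)) := by
    intro L f
    rw [Bool.eq_iff_iff]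
    simp only [List.any_eq_true]
    constructor
    · rintro ⟨i, hi, p, hp, h⟩; exact ⟨p, hp, i, hi, h⟩
    · rintro ⟨p, hp, i, hi, h⟩; exact ⟨i, hi, p, hp, h⟩
  rw [swap]
  apply pv_any_congr
  intro p hp
  have hk5 : decide (k < ([false, false, false, false, false] : List Bool).length) = true := by
    simpa using hk
  cases hpe : (p.1 == k) with
  | false => simp
  | true =>
    simp only [hk5, Bool.true_and]
    have hne : p.2 ≠ [] := by fin_cases hp <;> simp
    rw [← pv_occ_eq_isIn p.2 _ hne]

theorem pv_scan_getElem (code : String) (k : Nat) (hk : k < 5) :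
    (pvScan code)[k]?.getD false
    = pvKW.any (fun p => p.1 == k && PySem.Chars.isIn p.2 (PySem.Chars.lower code.toList)) :=
  pv_scan_getD code k hk

-- ===== VERDICT =====
set_option maxHeartbeats 1000000 in
theorem find_common_code_patterns_py_spec : Claim_equal_find_common_code_patterns_py := by
  intro c1 c2 _
  unfold Spec_find_common_code_patterns_py
  unfold find_common_code_patterns_py find_common_code_patterns_py_alt
  simp only [pvNames, PySem.List.enumerate_cons, PySem.List.enumerate_nil, List.filterMap_cons, List.filterMap_nil]
  norm_num [PySem.List.pyGetD_ofNat', PySem.List.pyGetD_zero]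
  rw [pv_scan_getElem c1 0 (by norm_num), pv_scan_getElem c2 0 (by norm_num),
      pv_scan_getElem c1 1 (by norm_num), pv_scan_getElem c2 1 (by norm_num),
      pv_scan_getElem c1 2 (by norm_num), pv_scan_getElem c2 2 (by norm_num),
      pv_scan_getElem c1 3 (by norm_num), pv_scan_getElem c2 3 (by norm_num),
      pv_scan_getElem c1 4 (by norm_num), pv_scan_getElem c2 4 (by norm_num)]
  simp [pvTableA, pvKW]
  by_cases h1 : (PySem.Chars.isIn ['d', 'o', ' '] (PySem.Chars.lower c1.toList) = true ∨ PySem.Chars.isIn ['w', 'h', 'i', 'l', 'e'] (PySem.Chars.lower c1.toList) = true ∨ PySem.Chars.isIn ['f', 'o', 'r'] (PySem.Chars.lower c1.toList) = true) ∧ (PySem.Chars.isIn ['d', 'o', ' '] (PySem.Chars.lower c2.toList) = true ∨ PySem.Chars.isIn ['w', 'h', 'i', 'l', 'e'] (PySem.Chars.lower c2.toList) = true ∨ PySem.Chars.isIn ['f', 'o', 'r'] (PySem.Chars.lower c2.toList) = true) <;>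
  by_cases h2 : (PySem.Chars.isIn ['i', 'f', ' '] (PySem.Chars.lower c1.toList) = true ∨ PySem.Chars.isIn ['s', 'e', 'l', 'e', 'c', 't', ' ', 'c', 'a', 's', 'e'] (PySem.Chars.lower c1.toList) = true ∨ PySem.Chars.isIn ['w', 'h', 'e', 'r', 'e'] (PySem.Chars.lower c1.toList) = true) ∧ (PySem.Chars.isIn ['i', 'f', ' '] (PySem.Chars.lower c2.toList) = true ∨ PySem.Chars.isIn ['s', 'e', 'l', 'e', 'c', 't', ' ', 'c', 'a', 's', 'e'] (PySem.Chars.lower c2.toList) = true ∨ PySem.Chars.isIn ['w', 'h', 'e', 'r', 'e'] (PySem.Chars.lower c2.toList) = true) <;>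
  by_cases h3 : (PySem.Chars.isIn ['s', 'q', 'r', 't'] (PySem.Chars.lower c1.toList) = true ∨ PySem.Chars.isIn ['s', 'i', 'n'] (PySem.Chars.lower c1.toList) = true ∨ PySem.Chars.isIn ['c', 'o', 's'] (PySem.Chars.lower c1.toList) = true ∨ PySem.Chars.isIn ['e', 'x', 'p'] (PySem.Chars.lower c1.toList) = true ∨ PySem.Chars.isIn ['l', 'o', 'g'] (PySem.Chars.lower c1.toList) = true) ∧ (PySem.Chars.isIn ['s', 'q', 'r', 't'] (PySem.Chars.lower c2.toList) = true ∨ PySem.Chars.isIn ['s', 'i', 'n'] (PySem.Chars.lower c2.toList) = true ∨ PySem.Chars.isIn ['c', 'o', 's'] (PySem.Chars.lower c2.toList) = true ∨ PySem.Chars.isIn ['e', 'x', 'p'] (PySem.Chars.lower c2.toList) = true ∨ PySem.Chars.isIn ['l', 'o', 'g'] (PySem.Chars.lower c2.toList) = true) <;>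
  by_cases h4 : (PySem.Chars.isIn ['s', 'u', 'm', '('] (PySem.Chars.lower c1.toList) = true ∨ PySem.Chars.isIn ['p', 'r', 'o', 'd', 'u', 'c', 't', '('] (PySem.Chars.lower c1.toList) = true ∨ PySem.Chars.isIn ['m', 'a', 'x', 'v', 'a', 'l'] (PySem.Chars.lower c1.toList) = true ∨ PySem.Chars.isIn ['m', 'i', 'n', 'v', 'a', 'l'] (PySem.Chars.lower c1.toList) = true) ∧ (PySem.Chars.isIn ['s', 'u', 'm', '('] (PySem.Chars.lower c2.toList) = true ∨ PySem.Chars.isIn ['p', 'r', 'o', 'd', 'u', 'c', 't', '('] (PySem.Chars.lower c2.toList) = true ∨ PySem.Chars.isIn ['m', 'a', 'x', 'v', 'a', 'l'] (PySem.Chars.lower c2.toList) = true ∨ PySem.Chars.isIn ['m', 'i', 'n', 'v', 'a', 'l'] (PySem.Chars.lower c2.toList) = true) <;>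
  by_cases h5 : (PySem.Chars.isIn ['r', 'e', 'a', 'd'] (PySem.Chars.lower c1.toList) = true ∨ PySem.Chars.isIn ['w', 'r', 'i', 't', 'e'] (PySem.Chars.lower c1.toList) = true ∨ PySem.Chars.isIn ['p', 'r', 'i', 'n', 't'] (PySem.Chars.lower c1.toList) = true ∨ PySem.Chars.isIn ['o', 'p', 'e', 'n'] (PySem.Chars.lower c1.toList) = true ∨ PySem.Chars.isIn ['c', 'l', 'o', 's', 'e'] (PySem.Chars.lower c1.toList) = true) ∧ (PySem.Chars.isIn ['r', 'e', 'a', 'd'] (PySem.Chars.lower c2.toList) = true ∨ PySem.Chars.isIn ['w', 'r', 'i', 't', 'e'] (PySem.Chars.lower c2.toList) = true ∨ PySem.Chars.isIn ['p', 'r', 'i', 'n', 't'] (PySem.Chars.lower c2.toList) = true ∨ PySem.Chars.isIn ['o', 'p', 'e', 'n'] (PySem.Chars.lower c2.toList) = true ∨ PySem.Chars.isIn ['c', 'l', 'o', 's', 'e'] (PySem.Chars.lower c2.toList) = true) <;>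
    simp [h1, h2, h3, h4, h5]
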